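-- pv_equiv track=rewrite | github.com/dikarevafff/pitoni | iteration3/functions.py | team2_to_us_translator
-- ===== SOURCE A (Python) =====
-- def team2_to_us_translator(skoropis_dict):
--     translated = {
--       'lfi5': 0,
--       'lfi4': 0,
--       'lfi3': 0,
--       'lfi2': 0,
--       'lfi1': 0,
--       'rfi1': 0,
--       'rfi2': 0,
--       'rfi3': 0,
--       'rfi4': 0,
--       'rfi5': 0
--       }
--
--     for key, value in skoropis_dict.items():
--         match key:
--             case 'lfi5':
--                 translated['lfi5'] = value
--             case 'lfi4':
--                 translated['lfi4'] = value
--             case 'lfi3':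
--                 translated['lfi3'] = value
--             case 'lfi2':
--                 translated['lfi2'] = value
--             case 'lfi1':
--                 translated['lfi1'] = value
--             case 'rfi1':
--                 translated['rfi1'] = value
--             case 'rfi2':
--                 translated['rfi2'] = value
--             case 'rfi3':
--                 translated['rfi3'] = value
--             case 'rfi4':
--                 translated['rfi4'] = value
--             case 'rfi5':
--                 translated['rfi5'] = value
--     return translated
-- ===== SOURCE B (Python) =====
-- def team2_to_us_translator(skoropis_dict):
--     keys = ('lfi5', 'lfi4', 'lfi3', 'lfi2', 'lfi1',
--             'rfi1', 'rfi2', 'rfi3', 'rfi4', 'rfi5')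
--     return {k: skoropis_dict.get(k, 0) for k in keys}
-- ===== Notes on version B (the rewrite author's own statement) =====
-- stated objective: idiomatic
-- what changed: B iterates over the fixed tuple of the 10 known keys and builds the result with a dict comprehension using skoropis_dict.get(k, 0), instead of A's loop over all input items with a 10-way match per entry.
import Mathlib
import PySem

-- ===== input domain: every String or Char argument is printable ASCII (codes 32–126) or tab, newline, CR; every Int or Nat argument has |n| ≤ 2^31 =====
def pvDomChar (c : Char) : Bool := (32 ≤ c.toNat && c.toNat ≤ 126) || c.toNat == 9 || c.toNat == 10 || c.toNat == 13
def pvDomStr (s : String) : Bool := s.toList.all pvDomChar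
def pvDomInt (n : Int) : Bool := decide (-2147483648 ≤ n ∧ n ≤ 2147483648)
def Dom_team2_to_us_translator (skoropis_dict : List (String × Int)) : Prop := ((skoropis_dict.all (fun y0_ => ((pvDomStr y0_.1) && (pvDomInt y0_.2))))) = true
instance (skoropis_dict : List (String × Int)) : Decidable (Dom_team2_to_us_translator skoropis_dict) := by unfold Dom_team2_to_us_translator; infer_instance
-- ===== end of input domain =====

-- B copies the 10 known keys by iterating over the fixed key tuple with a dict
-- comprehension and .get(k, 0), instead of A's per-entry 10-way match loop (objective: idiomatic).

-- ===== PORT A =====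
def team2_to_us_translator (skoropis_dict : List (String × Int)) : List (String × Int) :=
  let translated : PySem.Dict String Int :=
    PySem.Dict.ofList [("lfi5", 0), ("lfi4", 0), ("lfi3", 0), ("lfi2", 0), ("lfi1", 0),
                       ("rfi1", 0), ("rfi2", 0), ("rfi3", 0), ("rfi4", 0), ("rfi5", 0)]
  (skoropis_dict.foldl (fun acc kv =>
      if kv.1 = "lfi5" then acc.insert "lfi5" kv.2
      else if kv.1 = "lfi4" then acc.insert "lfi4" kv.2
      else if kv.1 = "lfi3" then acc.insert "lfi3" kv.2
      else if kv.1 = "lfi2" then acc.insert "lfi2" kv.2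
      else if kv.1 = "lfi1" then acc.insert "lfi1" kv.2
      else if kv.1 = "rfi1" then acc.insert "rfi1" kv.2
      else if kv.1 = "rfi2" then acc.insert "rfi2" kv.2
      else if kv.1 = "rfi3" then acc.insert "rfi3" kv.2
      else if kv.1 = "rfi4" then acc.insert "rfi4" kv.2
      else if kv.1 = "rfi5" then acc.insert "rfi5" kv.2
      else acc) translated).items

-- ===== PORT B =====
def pvKeysB : List String :=
  ["lfi5", "lfi4", "lfi3", "lfi2", "lfi1", "rfi1", "rfi2", "rfi3", "rfi4", "rfi5"]

def team2_to_us_translator_alt (skoropis_dict : List (String × Int)) : List (String × Int) :=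
  pvKeysB.map (fun k => (k, (PySem.Dict.mk skoropis_dict).getD k 0))

-- ===== PRECONDITION & SPEC =====
-- Pre_ excludes association lists with duplicate keys: a Python dict cannot contain them,
-- so they represent no input to the Python function.
def Pre_team2_to_us_translator (skoropis_dict : List (String × Int)) : Prop :=
  (skoropis_dict.map Prod.fst).Nodup
instance (skoropis_dict : List (String × Int)) : Decidable (Pre_team2_to_us_translator skoropis_dict) := by unfold Pre_team2_to_us_translator; infer_instance

def pvWitness_team2_to_us_translator : (List (String × Int)) := [("lfi5", 3), ("zzz", 9), ("rfi1", -2)]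

def Spec_team2_to_us_translator (skoropis_dict : List (String × Int)) (out : List (String × Int)) : Prop := out = team2_to_us_translator_alt skoropis_dict
instance (skoropis_dict : List (String × Int)) (out : List (String × Int)) : Decidable (Spec_team2_to_us_translator skoropis_dict out) := by unfold Spec_team2_to_us_translator; infer_instance

-- ===== CLAIM (what is proved, stated in full; the proofs are below) =====
def Claim_equal_team2_to_us_translator : Prop := ∀ (skoropis_dict : List (String × Int)), Dom_team2_to_us_translator skoropis_dict → Pre_team2_to_us_translator skoropis_dict → Spec_team2_to_us_translator skoropis_dict (team2_to_us_translator skoropis_dict)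

-- ===== LEMMAS AND PROOFS =====

-- the state A's loop maintains: a dict whose items are exactly the 10 known keys, in order,
-- each paired with the current value f k
def pvState (f : String → Int) : PySem.Dict String Int :=
  PySem.Dict.mk (pvKeysB.map (fun k => (k, f k)))

def pvStep (acc : PySem.Dict String Int) (kv : String × Int) : PySem.Dict String Int :=
  if kv.1 = "lfi5" then acc.insert "lfi5" kv.2
  else if kv.1 = "lfi4" then acc.insert "lfi4" kv.2
  else if kv.1 = "lfi3" then acc.insert "lfi3" kv.2
  else if kv.1 = "lfi2" then acc.insert "lfi2" kv.2
  else if kv.1 = "lfi1" then acc.insert "lfi1" kv.2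
  else if kv.1 = "rfi1" then acc.insert "rfi1" kv.2
  else if kv.1 = "rfi2" then acc.insert "rfi2" kv.2
  else if kv.1 = "rfi3" then acc.insert "rfi3" kv.2
  else if kv.1 = "rfi4" then acc.insert "rfi4" kv.2
  else if kv.1 = "rfi5" then acc.insert "rfi5" kv.2
  else acc

lemma pvStep_eq (f : String → Int) (k : String) (v : Int) :
    pvStep (pvState f) (k, v) = pvState (fun k' => if k' = k then v else f k') := by
  by_cases h1 : k = "lfi5"
  · subst h1; apply PySem.Dict.ext
    simp [pvStep, pvState, pvKeysB, PySem.Dict.insert]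
  all_goals by_cases h2 : k = "lfi4"
  all_goals try (subst h2; apply PySem.Dict.ext; simp [pvStep, pvState, pvKeysB, PySem.Dict.insert])
  all_goals by_cases h3 : k = "lfi3"
  all_goals try (subst h3; apply PySem.Dict.ext; simp [pvStep, pvState, pvKeysB, PySem.Dict.insert])
  all_goals by_cases h4 : k = "lfi2"
  all_goals try (subst h4; apply PySem.Dict.ext; simp [pvStep, pvState, pvKeysB, PySem.Dict.insert])
  all_goals by_cases h5 : k = "lfi1"
  all_goals try (subst h5; apply PySem.Dict.ext; simp [pvStep, pvState, pvKeysB, PySem.Dict.insert])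
  all_goals by_cases h6 : k = "rfi1"
  all_goals try (subst h6; apply PySem.Dict.ext; simp [pvStep, pvState, pvKeysB, PySem.Dict.insert])
  all_goals by_cases h7 : k = "rfi2"
  all_goals try (subst h7; apply PySem.Dict.ext; simp [pvStep, pvState, pvKeysB, PySem.Dict.insert])
  all_goals by_cases h8 : k = "rfi3"
  all_goals try (subst h8; apply PySem.Dict.ext; simp [pvStep, pvState, pvKeysB, PySem.Dict.insert])
  all_goals by_cases h9 : k = "rfi4"
  all_goals try (subst h9; apply PySem.Dict.ext; simp [pvStep, pvState, pvKeysB, PySem.Dict.insert])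
  all_goals by_cases h10 : k = "rfi5"
  all_goals try (subst h10; apply PySem.Dict.ext; simp [pvStep, pvState, pvKeysB, PySem.Dict.insert])
  -- default case: k matches none of the known keys
  apply PySem.Dict.ext
  simp [pvStep, pvState, pvKeysB, h1, h2, h3, h4, h5, h6, h7, h8, h9, h10,
        Ne.symm h1, Ne.symm h2, Ne.symm h3, Ne.symm h4, Ne.symm h5,
        Ne.symm h6, Ne.symm h7, Ne.symm h8, Ne.symm h9, Ne.symm h10]

lemma pvFold_eq (d : List (String × Int)) (hd : (d.map Prod.fst).Nodup) (f : String → Int) :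
    d.foldl pvStep (pvState f)
      = pvState (fun k => ((PySem.Dict.mk d).get? k).getD (f k)) := by
  induction d generalizing f with
  | nil => simp [PySem.Dict.get?]
  | cons x rest ih =>
    obtain ⟨k, v⟩ := x
    simp only [List.map_cons, List.nodup_cons] at hd
    rw [List.foldl_cons, pvStep_eq f k v, ih hd.2]
    apply congrArg
    funext k'
    rw [PySem.Dict.get?_mk_cons]
    by_cases hk : k' = k
    · subst hk
      have hnone : (PySem.Dict.mk rest).get? k' = none := by
        rw [PySem.Dict.get?_eq_none_iff_not_mem_keys]
        simpa [PySem.Dict.keys] using hd.1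
      simp [hnone]
    · simp [hk, Ne.symm hk]

lemma pvItems_state (f : String → Int) :
    (pvState f).items = pvKeysB.map (fun k => (k, f k)) := rfl

-- ===== VERDICT (by name: the statement is the Claim_ definition above) =====
theorem team2_to_us_translator_spec : Claim_equal_team2_to_us_translator := by
  intro d _hdom hpre
  show team2_to_us_translator d = team2_to_us_translator_alt d
  have hinit : PySem.Dict.ofList
      [(("lfi5" : String), (0 : Int)), ("lfi4", 0), ("lfi3", 0), ("lfi2", 0), ("lfi1", 0),
       ("rfi1", 0), ("rfi2", 0), ("rfi3", 0), ("rfi4", 0), ("rfi5", 0)]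
      = pvState (fun _ => 0) := by decide
  unfold team2_to_us_translator
  rw [hinit]
  show (List.foldl pvStep (pvState fun _ => 0) d).items = team2_to_us_translator_alt d
  rw [pvFold_eq d hpre, pvItems_state]
  unfold team2_to_us_translator_alt
  apply List.map_congr_left
  intro k _
  rw [PySem.Dict.getD_eq_get?_getD]
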